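-- pv_equiv track=rewrite | github.com/Jesper-Nilsson/feature-extraction-balance-sheets | code/full_pipeline.py | align_tokens_to_lines
-- ===== SOURCE A (Python) =====
-- def align_tokens_to_lines(tokens, labels, offset_mappings, line_indices):
--     line_tokens = [[] for _ in line_indices]
--     line_labels = [[] for _ in line_indices]
--
--     # Iterate over each token and its corresponding label and offset
--     for token, label, offset in zip(tokens, labels, offset_mappings):
--         #line this token belongs to
--         for line_idx, (line_start, line_end) in enumerate(line_indices):
--             # add tokens within the line bounds
--             if offset[0] >= line_start and offset[1] <= line_end:
--                 line_tokens[line_idx].append(token)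
--                 line_labels[line_idx].append(label)
--                 break
--     return line_tokens, line_labels
-- ===== SOURCE B (Python) =====
-- def align_tokens_to_lines(tokens, labels, offset_mappings, line_indices):
--     # Line-major pass: walk the lines in order, each line grabs the still-unassigned
--     # tokens it contains; a token is grabbed by the first line that fits it, which is
--     # exactly A's first-match rule, and buckets are built directly in order.
--     line_tokens = []
--     line_labels = []
--     remaining = list(zip(tokens, labels, offset_mappings))
--     for line_start, line_end in line_indices:
--         matched = [tlo for tlo in remaining
--                    if tlo[2][0] >= line_start and tlo[2][1] <= line_end]
--         line_tokens.append([t for t, _, _ in matched])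
--         line_labels.append([l for _, l, _ in matched])
--         remaining = [tlo for tlo in remaining
--                      if not (tlo[2][0] >= line_start and tlo[2][1] <= line_end)]
--     return line_tokens, line_labels
-- ===== Notes on version B (the rewrite author's own statement) =====
-- stated objective: alternative
-- what changed: Replaces A's token-major scan (for each token, linear scan over all lines with break, appending into index-addressed buckets) by a line-major single pass: each line in turn filters the still-unassigned tokens it contains out of a shrinking worklist and emits its bucket directly, with no index bookkeeping; equivalent on all inputs since lines are visited in order, so the first line that grabs a token is A's first match.
import Mathlib
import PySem

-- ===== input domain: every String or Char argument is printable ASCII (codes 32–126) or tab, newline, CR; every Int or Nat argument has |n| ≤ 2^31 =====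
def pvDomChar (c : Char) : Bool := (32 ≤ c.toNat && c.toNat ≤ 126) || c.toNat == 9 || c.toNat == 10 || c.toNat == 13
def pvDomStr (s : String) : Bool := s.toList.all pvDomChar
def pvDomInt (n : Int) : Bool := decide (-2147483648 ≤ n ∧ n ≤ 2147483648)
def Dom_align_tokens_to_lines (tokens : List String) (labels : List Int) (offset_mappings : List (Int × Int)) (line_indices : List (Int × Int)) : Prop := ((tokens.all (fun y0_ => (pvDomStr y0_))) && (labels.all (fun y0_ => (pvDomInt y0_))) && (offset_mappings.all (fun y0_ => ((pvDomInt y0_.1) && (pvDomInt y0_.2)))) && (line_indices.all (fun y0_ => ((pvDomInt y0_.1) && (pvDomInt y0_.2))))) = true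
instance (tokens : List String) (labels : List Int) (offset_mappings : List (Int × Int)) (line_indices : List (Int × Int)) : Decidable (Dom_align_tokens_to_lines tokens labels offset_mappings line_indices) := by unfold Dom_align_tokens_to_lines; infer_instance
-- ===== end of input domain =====

-- B replaces A's token-major scan (inner loop over all lines with break, index-addressed
-- buckets) by a line-major single pass over a shrinking worklist of unassigned tokens,
-- emitting each line's bucket directly; equivalent on all inputs (alternative traversal).

-- ===== PORT A =====
-- inner 'for line_idx, (line_start, line_end) in enumerate(line_indices): … break'
def pvInnerA (tok : String) (lab : Int) (off : Int × Int) :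
    List (Int × Int) → Nat → List (List String) × List (List Int) → List (List String) × List (List Int)
  | [], _, st => st
  | (ls, le) :: rest, idx, st =>
    if ls ≤ off.1 ∧ off.2 ≤ le then
      (st.1.set idx (st.1.getD idx [] ++ [tok]), st.2.set idx (st.2.getD idx [] ++ [lab]))
    else pvInnerA tok lab off rest (idx + 1) st

def align_tokens_to_lines (tokens : List String) (labels : List Int) (offset_mappings : List (Int × Int)) (line_indices : List (Int × Int)) : List (List String) × List (List Int) :=
  (tokens.zip (labels.zip offset_mappings)).foldl
    (fun st tlo => pvInnerA tlo.1 tlo.2.1 tlo.2.2 line_indices 0 st)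
    (line_indices.map (fun _ => ([] : List String)), line_indices.map (fun _ => ([] : List Int)))

-- ===== PORT B =====
-- Source B's 'for line_start, line_end in line_indices' loop over the shrinking worklist 'remaining'
def pvLoopB : List (String × Int × (Int × Int)) → List (Int × Int) →
    List (List String) × List (List Int) → List (List String) × List (List Int)
  | _, [], acc => acc
  | rem, (ls, le) :: rest, acc =>
    let matched := rem.filter (fun tlo => decide (ls ≤ tlo.2.2.1 ∧ tlo.2.2.2 ≤ le))
    pvLoopB (rem.filter (fun tlo => !decide (ls ≤ tlo.2.2.1 ∧ tlo.2.2.2 ≤ le))) rest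
      (acc.1 ++ [matched.map (fun tlo => tlo.1)], acc.2 ++ [matched.map (fun tlo => tlo.2.1)])

def align_tokens_to_lines_alt (tokens : List String) (labels : List Int) (offset_mappings : List (Int × Int)) (line_indices : List (Int × Int)) : List (List String) × List (List Int) :=
  pvLoopB (tokens.zip (labels.zip offset_mappings)) line_indices ([], [])

-- ===== PRECONDITION & SPEC =====
def Spec_align_tokens_to_lines (tokens : List String) (labels : List Int) (offset_mappings : List (Int × Int)) (line_indices : List (Int × Int)) (out : List (List String) × List (List Int)) : Prop := out = align_tokens_to_lines_alt tokens labels offset_mappings line_indices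
instance (tokens : List String) (labels : List Int) (offset_mappings : List (Int × Int)) (line_indices : List (Int × Int)) (out : List (List String) × List (List Int)) : Decidable (Spec_align_tokens_to_lines tokens labels offset_mappings line_indices out) := by unfold Spec_align_tokens_to_lines; infer_instance

-- ===== CLAIM (what is proved, stated in full; the proofs are below) =====
def Claim_equal_align_tokens_to_lines : Prop := ∀ (tokens : List String) (labels : List Int) (offset_mappings : List (Int × Int)) (line_indices : List (Int × Int)), Dom_align_tokens_to_lines tokens labels offset_mappings line_indices → Spec_align_tokens_to_lines tokens labels offset_mappings line_indices (align_tokens_to_lines tokens labels offset_mappings line_indices)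

-- ===== LEMMAS AND PROOFS =====

-- first-match index: the line A's inner loop breaks at
def pvFindLine (o : Int × Int) : List (Int × Int) → Nat → Option Nat
  | [], _ => none
  | (ls, le) :: rest, idx =>
    if ls ≤ o.1 ∧ o.2 ≤ le then some idx else pvFindLine o rest (idx + 1)

theorem pvInnerA_eq_find (tok : String) (lab : Int) (off : Int × Int) :
    ∀ (lines : List (Int × Int)) (idx : Nat) (st : List (List String) × List (List Int)),
    pvInnerA tok lab off lines idx st =
      match pvFindLine off lines idx with
      | some i => (st.1.set i (st.1.getD i [] ++ [tok]), st.2.set i (st.2.getD i [] ++ [lab]))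
      | none => st := by
  intro lines
  induction lines with
  | nil => intro idx st; rfl
  | cons p rest ih =>
    intro idx st
    obtain ⟨ls, le⟩ := p
    by_cases h : ls ≤ off.1 ∧ off.2 ≤ le
    · simp [pvInnerA, pvFindLine, h]
    · simp [pvInnerA, pvFindLine, h, ih]

theorem pvFindLine_shift (o : Int × Int) :
    ∀ (lines : List (Int × Int)) (k : Nat),
    pvFindLine o lines (k + 1) = Option.map (· + 1) (pvFindLine o lines k) := by
  intro lines
  induction lines with
  | nil => intro k; rfl
  | cons p rest ih =>
    intro k
    obtain ⟨ls, le⟩ := p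
    by_cases h : ls ≤ o.1 ∧ o.2 ≤ le
    · simp [pvFindLine, h]
    · simp [pvFindLine, h, ih]

theorem pvFindLine_lt (o : Int × Int) :
    ∀ (lines : List (Int × Int)) (i : Nat),
    pvFindLine o lines 0 = some i → i < lines.length := by
  intro lines
  induction lines with
  | nil => intro i h; simp [pvFindLine] at h
  | cons p rest ih =>
    intro i h
    obtain ⟨ls, le⟩ := p
    by_cases hc : ls ≤ o.1 ∧ o.2 ≤ le
    · rw [pvFindLine, if_pos hc] at h
      have h0 := Option.some.inj h
      subst h0
      simp
    · rw [pvFindLine, if_neg hc, pvFindLine_shift] at h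
      cases hrest : pvFindLine o rest 0 with
      | none => rw [hrest] at h; simp at h
      | some j =>
        rw [hrest] at h
        simp at h
        have := ih j hrest
        simp
        omega

-- invariant of A's fold: bucket i accumulates the tokens whose first match is line i
theorem pvFoldA_char (lines : List (Int × Int)) :
    ∀ (ts : List (String × Int × (Int × Int))) (st : List (List String) × List (List Int)),
    st.1.length = lines.length → st.2.length = lines.length →
    ((ts.foldl (fun st tlo => pvInnerA tlo.1 tlo.2.1 tlo.2.2 lines 0 st) st).1.length = lines.length ∧
     (ts.foldl (fun st tlo => pvInnerA tlo.1 tlo.2.1 tlo.2.2 lines 0 st) st).2.length = lines.length ∧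
     ∀ i, i < lines.length →
      (ts.foldl (fun st tlo => pvInnerA tlo.1 tlo.2.1 tlo.2.2 lines 0 st) st).1.getD i [] =
        st.1.getD i [] ++ (ts.filter (fun t => decide (pvFindLine t.2.2 lines 0 = some i))).map (fun t => t.1) ∧
      (ts.foldl (fun st tlo => pvInnerA tlo.1 tlo.2.1 tlo.2.2 lines 0 st) st).2.getD i [] =
        st.2.getD i [] ++ (ts.filter (fun t => decide (pvFindLine t.2.2 lines 0 = some i))).map (fun t => t.2.1)) := by
  intro ts
  induction ts with
  | nil => intro st h1 h2; exact ⟨h1, h2, fun i _ => ⟨by simp, by simp⟩⟩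
  | cons t ts ih =>
    intro st h1 h2
    rw [List.foldl_cons, pvInnerA_eq_find]
    cases hf : pvFindLine t.2.2 lines 0 with
    | none =>
      obtain ⟨g1, g2, g3⟩ := ih st h1 h2
      refine ⟨g1, g2, fun i hi => ?_⟩
      obtain ⟨e1, e2⟩ := g3 i hi
      have hne : ¬ pvFindLine t.2.2 lines 0 = some i := by simp [hf]
      constructor
      · rw [e1]; simp [hne]
      · rw [e2]; simp [hne]
    | some j =>
      have hj : j < lines.length := pvFindLine_lt t.2.2 lines j hf
      obtain ⟨g1, g2, g3⟩ := ih
        (st.1.set j (st.1.getD j [] ++ [t.1]), st.2.set j (st.2.getD j [] ++ [t.2.1]))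
        (by simpa using h1) (by simpa using h2)
      refine ⟨g1, g2, fun i hi => ?_⟩
      obtain ⟨e1, e2⟩ := g3 i hi
      by_cases hij : j = i
      · subst hij
        have hs1 : (st.1.set j (st.1.getD j [] ++ [t.1])).getD j [] = st.1.getD j [] ++ [t.1] := by
          rw [List.getD_eq_getElem _ _ (by simp only [List.length_set, h1]; exact hj)]
          simp
        have hs2 : (st.2.set j (st.2.getD j [] ++ [t.2.1])).getD j [] = st.2.getD j [] ++ [t.2.1] := by
          rw [List.getD_eq_getElem _ _ (by simp only [List.length_set, h2]; exact hj)]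
          simp
        constructor
        · rw [e1, hs1]; simp [hf]
        · rw [e2, hs2]; simp [hf]
      · have hne : ¬ pvFindLine t.2.2 lines 0 = some i := by simp [hf]; omega
        have hs1 : (st.1.set j (st.1.getD j [] ++ [t.1])).getD i [] = st.1.getD i [] := by
          unfold List.getD
          rw [List.getElem?_set_ne hij]
        have hs2 : (st.2.set j (st.2.getD j [] ++ [t.2.1])).getD i [] = st.2.getD i [] := by
          unfold List.getD
          rw [List.getElem?_set_ne hij]
        constructor
        · rw [e1, hs1]; simp [hne]
        · rw [e2, hs2]; simp [hne]

-- B's worklist loop produces, for each line i, the rem-tokens whose first match is i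
theorem pvLoopB_char :
    ∀ (lines : List (Int × Int)) (rem : List (String × Int × (Int × Int)))
      (acc : List (List String) × List (List Int)),
    pvLoopB rem lines acc =
      (acc.1 ++ (List.range lines.length).map
        (fun i => ((rem.filter (fun t => decide (pvFindLine t.2.2 lines 0 = some i))).map (fun t => t.1))),
       acc.2 ++ (List.range lines.length).map
        (fun i => ((rem.filter (fun t => decide (pvFindLine t.2.2 lines 0 = some i))).map (fun t => t.2.1)))) := by
  intro lines
  induction lines with
  | nil => intro rem acc; simp [pvLoopB]
  | cons p rest ih =>
    intro rem acc
    obtain ⟨ls, le⟩ := p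
    rw [pvLoopB, ih]
    have hzero : ∀ t : String × Int × (Int × Int),
        (decide (pvFindLine t.2.2 ((ls, le) :: rest) 0 = some 0)) = decide (ls ≤ t.2.2.1 ∧ t.2.2.2 ≤ le) := by
      intro t
      by_cases h : ls ≤ t.2.2.1 ∧ t.2.2.2 ≤ le
      · simp [pvFindLine, h]
      · rw [pvFindLine, if_neg h, pvFindLine_shift]
        cases pvFindLine t.2.2 rest 0 <;> simp [h]
    have hsucc : ∀ (i : Nat) (t : String × Int × (Int × Int)),
        (decide (pvFindLine t.2.2 ((ls, le) :: rest) 0 = some (i + 1))) =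
        ((!decide (ls ≤ t.2.2.1 ∧ t.2.2.2 ≤ le)) && decide (pvFindLine t.2.2 rest 0 = some i)) := by
      intro i t
      by_cases h : ls ≤ t.2.2.1 ∧ t.2.2.2 ≤ le
      · simp [pvFindLine, h]
      · rw [pvFindLine, if_neg h, pvFindLine_shift]
        cases hr : pvFindLine t.2.2 rest 0 <;> simp [h]
    have hrem : ∀ i : Nat,
        (rem.filter (fun t => !decide (ls ≤ t.2.2.1 ∧ t.2.2.2 ≤ le))).filter
            (fun t => decide (pvFindLine t.2.2 rest 0 = some i)) =
        rem.filter (fun t => decide (pvFindLine t.2.2 ((ls, le) :: rest) 0 = some (i + 1))) := by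
      intro i
      rw [List.filter_filter]
      apply List.filter_congr
      intro t _
      rw [hsucc i t, Bool.and_comm]
    simp only [List.length_cons, List.range_succ_eq_map, List.map_cons, List.map_map]
    rw [Prod.ext_iff]
    constructor
    · rw [List.filter_congr (fun t _ => hzero t)]
      rw [show List.map
            (fun i => List.map (fun tlo => tlo.1)
              (List.filter (fun t => decide (pvFindLine t.2.2 rest 0 = some i))
                (List.filter (fun tlo => !decide (ls ≤ tlo.2.2.1 ∧ tlo.2.2.2 ≤ le)) rem)))
            (List.range rest.length) =
          List.map
            ((fun i => List.map (fun tlo => tlo.1)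
              (List.filter (fun t => decide (pvFindLine t.2.2 ((ls, le) :: rest) 0 = some i)) rem)) ∘ Nat.succ)
            (List.range rest.length) from
        List.map_congr_left (fun i _ => by
          simp only [Function.comp]
          rw [hrem i])]
      simp
    · rw [List.filter_congr (fun t _ => hzero t)]
      rw [show List.map
            (fun i => List.map (fun tlo => tlo.2.1)
              (List.filter (fun t => decide (pvFindLine t.2.2 rest 0 = some i))
                (List.filter (fun tlo => !decide (ls ≤ tlo.2.2.1 ∧ tlo.2.2.2 ≤ le)) rem)))
            (List.range rest.length) =
          List.map
            ((fun i => List.map (fun tlo => tlo.2.1)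
              (List.filter (fun t => decide (pvFindLine t.2.2 ((ls, le) :: rest) 0 = some i)) rem)) ∘ Nat.succ)
            (List.range rest.length) from
        List.map_congr_left (fun i _ => by
          simp only [Function.comp]
          rw [hrem i])]
      simp

-- ===== VERDICT (by name: the statement is the Claim_ definition above) =====
theorem align_tokens_to_lines_spec : Claim_equal_align_tokens_to_lines := by
  intro tokens labels offs lines _
  unfold Spec_align_tokens_to_lines align_tokens_to_lines align_tokens_to_lines_alt
  rw [pvLoopB_char]
  obtain ⟨h1, h2, h3⟩ := pvFoldA_char lines (tokens.zip (labels.zip offs))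
    (lines.map (fun _ => ([] : List String)), lines.map (fun _ => ([] : List Int)))
    (by simp) (by simp)
  have hinit1 : ∀ i, i < lines.length → (lines.map (fun _ => ([] : List String))).getD i [] = [] := by
    intro i hi
    rw [List.getD_eq_getElem _ _ (by simpa using hi)]
    simp
  have hinit2 : ∀ i, i < lines.length → (lines.map (fun _ => ([] : List Int))).getD i [] = [] := by
    intro i hi
    rw [List.getD_eq_getElem _ _ (by simpa using hi)]
    simp
  apply Prod.ext
  · apply List.ext_getElem
    · simpa using h1
    · intro i hi hi'
      have hilen : i < lines.length := by rwa [h1] at hi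
      have := (h3 i hilen).1
      rw [hinit1 i hilen, List.nil_append] at this
      rw [← List.getD_eq_getElem _ [] hi, this]
      simp [List.getElem_map]
  · apply List.ext_getElem
    · simpa using h2
    · intro i hi hi'
      have hilen : i < lines.length := by rwa [h2] at hi
      have := (h3 i hilen).2
      rw [hinit2 i hilen, List.nil_append] at this
      rw [← List.getD_eq_getElem _ [] hi, this]
      simp [List.getElem_map]
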